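-- pv_equiv track=rewrite | github.com/lkcfqy/project_laplace | src/dsl.py | detect_periodicity
-- ===== SOURCE A (Python) =====
-- def detect_periodicity(grid):
--     """Detect if grid is tiling of a smaller patch. Returns (h, w) of tile or None."""
--     rows, cols = len(grid), len(grid[0])
--     for h in range(1, rows // 2 + 1):
--         if rows % h == 0:
--             # Check vertical tiling
--             is_v_tile = True
--             base = grid[:h]
--             for k in range(1, rows // h):
--                 if grid[k*h:(k+1)*h] != base:
--                     is_v_tile = False
--                     break
--             if is_v_tile:
--                 # Vertical Periodicity Found, check horizontal
--                 # Detailed impl omitted for brevity, returning simple vertical period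
--                 return (h, cols) # Means rows repeat every h
--     return None
-- ===== SOURCE B (Python) =====
-- def detect_periodicity(grid):
--     """Detect if grid is tiling of a smaller patch. Returns (h, w) of tile or None."""
--     rows, cols = len(grid), len(grid[0])
--     # minimal vertical period of the row sequence (rows if aperiodic)
--     p = rows
--     for q in range(1, rows):
--         if all(grid[i] == grid[i - q] for i in range(q, rows)):
--             p = q
--             break
--     # by Fine-Wilf, any tiling height is a multiple of p, so the smallest
--     # tiling height exists iff p itself tiles
--     if 2 * p <= rows and rows % p == 0:
--         return (p, cols)
--     return None
-- ===== Notes on version B (the rewrite author's own statement) =====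
-- stated objective: alternative
-- what changed: B computes the minimal vertical period of the row sequence once by a first-match shift scan and decides with a single divisibility/size test (correct by the Fine-Wilf periodicity lemma), instead of A's scan over every divisor h with an inner chunk-by-chunk tile comparison.
import Mathlib
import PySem

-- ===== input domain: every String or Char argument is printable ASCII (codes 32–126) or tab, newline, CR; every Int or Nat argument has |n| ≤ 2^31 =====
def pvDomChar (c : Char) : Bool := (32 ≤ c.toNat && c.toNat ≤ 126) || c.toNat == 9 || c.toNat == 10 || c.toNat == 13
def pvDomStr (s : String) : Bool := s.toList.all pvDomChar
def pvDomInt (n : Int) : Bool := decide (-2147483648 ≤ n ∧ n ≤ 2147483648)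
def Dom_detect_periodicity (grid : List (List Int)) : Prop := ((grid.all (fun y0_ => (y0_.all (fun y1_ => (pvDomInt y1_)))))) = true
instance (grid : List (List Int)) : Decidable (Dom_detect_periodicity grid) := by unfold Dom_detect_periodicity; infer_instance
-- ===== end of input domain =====

-- B finds the minimal vertical period of the row sequence once and decides with a single
-- divisibility/size test (correct by the Fine-Wilf periodicity lemma), instead of A's scan
-- over every divisor h with an inner chunk-by-chunk tile comparison; equivalence is proved below.

-- ===== PORT A =====
def detect_periodicity (grid : List (List Int)) : Option (Int × Int) :=
  match PySem.List.pyGet? grid 0 with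
  | none => none  -- Python: grid[0] raises IndexError on empty grid; excluded by Pre_
  | some row0 =>
    let rows := grid.length
    let cols := row0.length
    (List.range' 1 (rows / 2)).findSome? (fun h =>
      if rows % h == 0 then
        let base := PySem.List.slice grid none (some ((h : Nat) : Int))
        let isVTile := (List.range' 1 (rows / h - 1)).all (fun k =>
          PySem.List.slice grid (some ((k * h : Nat) : Int)) (some (((k + 1) * h : Nat) : Int)) == base)
        if isVTile then some ((h : Int), (cols : Int)) else none
      else none)

-- ===== PORT B =====
def detect_periodicity_alt (grid : List (List Int)) : Option (Int × Int) :=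
  match PySem.List.pyGet? grid 0 with
  | none => none  -- Python: grid[0] raises IndexError on empty grid; excluded by Pre_
  | some row0 =>
    let rows := grid.length
    let cols := row0.length
    -- 'for q in range(1, rows): if all(...): p = q; break' = first match; 'p = rows' is the
    -- default.  All indices i, i-q are in range, so grid[i]? is exactly Python's grid[i].
    let p := ((List.range' 1 (rows - 1)).find? (fun q =>
        (List.range' q (rows - q)).all (fun i => grid[i]? == grid[i - q]?))).getD rows
    if 2 * p ≤ rows ∧ rows % p = 0 then some ((p : Int), (cols : Int)) else none

-- ===== PRECONDITION & SPEC =====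
-- Pre_ excludes only the empty grid, on which Python A (and B) raise IndexError at grid[0].
def Pre_detect_periodicity (grid : List (List Int)) : Prop := grid ≠ []
instance (grid : List (List Int)) : Decidable (Pre_detect_periodicity grid) := by unfold Pre_detect_periodicity; infer_instance
def pvWitness_detect_periodicity : List (List Int) := [[1], [1]]

def Spec_detect_periodicity (grid : List (List Int)) (out : Option (Int × Int)) : Prop := out = detect_periodicity_alt grid
instance (grid : List (List Int)) (out : Option (Int × Int)) : Decidable (Spec_detect_periodicity grid out) := by unfold Spec_detect_periodicity; infer_instance

-- ===== CLAIM (what is proved, stated in full; the proofs are below) =====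
def Claim_equal_detect_periodicity : Prop := ∀ (grid : List (List Int)), Dom_detect_periodicity grid → Pre_detect_periodicity grid → Spec_detect_periodicity grid (detect_periodicity grid)

-- ===== LEMMAS AND PROOFS =====

-- g has vertical period q (as a sequence of rows)
def pvPer (g : List (List Int)) (q : ℕ) : Prop := ∀ i, i + q < g.length → g[i + q]? = g[i]?

theorem pv_findSome?_congr {α β : Type} {l : List α} {f g : α → Option β}
    (h : ∀ a ∈ l, f a = g a) : l.findSome? f = l.findSome? g := by
  induction l with
  | nil => rfl
  | cons a t ih =>
    simp only [List.findSome?_cons, h a (by simp)]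
    cases g a with
    | none => exact ih (fun x hx => h x (by simp [hx]))
    | some b => rfl

theorem pv_findSome?_if_eq_map {α : Type} (l : List ℕ) (c : ℕ → Bool) (g : ℕ → α) :
    l.findSome? (fun h => if c h then some (g h) else none) = (l.find? c).map g := by
  induction l with
  | nil => rfl
  | cons a t ih =>
    by_cases h : c a <;> simp [h, ih]

theorem pv_find?_range'_eq_some {f : ℕ → Bool} {s len p : ℕ} :
    (List.range' s len).find? f = some p ↔
      (s ≤ p ∧ p < s + len ∧ f p = true ∧ ∀ q, s ≤ q → q < p → f q = false) := by
  induction len generalizing s with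
  | zero =>
    simp only [List.range', List.find?_nil]
    constructor
    · intro h; cases h
    · rintro ⟨h1, h2, -⟩; omega
  | succ n ih =>
    rw [List.range'_succ, List.find?_cons]
    by_cases hs : f s
    · simp only [hs]
      constructor
      · rintro ⟨rfl⟩
        exact ⟨le_refl _, by omega, hs, fun q h1 h2 => by omega⟩
      · rintro ⟨h1, _, _, h4⟩
        rcases Nat.eq_or_lt_of_le h1 with rfl | hlt
        · rfl
        · exact absurd hs (by simp [h4 s (le_refl _) hlt])

    · rw [Bool.not_eq_true] at hs
      simp only [hs]
      rw [ih]
      constructor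
      · rintro ⟨h1, h2, h3, h4⟩
        refine ⟨by omega, by omega, h3, fun q hq1 hq2 => ?_⟩
        rcases Nat.eq_or_lt_of_le hq1 with rfl | h
        · exact hs
        · exact h4 q h hq2
      · rintro ⟨h1, h2, h3, h4⟩
        have hsp : s ≠ p := by rintro rfl; rw [h3] at hs; cases hs
        exact ⟨by omega, by omega, h3, fun q hq1 hq2 => h4 q (by omega) hq2⟩

-- B's inner 'all' test is exactly pvPer
theorem pv_allshift_iff (g : List (List Int)) (q : ℕ) :
    (((List.range' q (g.length - q)).all (fun i => g[i]? == g[i - q]?)) = true) ↔ pvPer g q := by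
  simp only [List.all_eq_true, List.mem_range'_1, beq_iff_eq]
  constructor
  · intro h i hi
    have := h (i + q) ⟨Nat.le_add_left _ _, by omega⟩
    simpa [Nat.add_sub_cancel] using this
  · rintro h i ⟨h1, h2⟩
    have hi : (i - q) + q = i := by omega
    have := h (i - q) (by omega)
    rw [hi] at this; exact this

-- pointwise form of grid[h:] = grid[:n-h]
theorem pv_shift_iff (grid : List (List Int)) (h : ℕ) (hh : h ≤ grid.length) :
    (grid.drop h = grid.take (grid.length - h)) ↔ pvPer grid h := by
  constructor
  · intro he i hi
    have h3 := congrArg (fun l => l[i]?) he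
    simp only [List.getElem?_drop, List.getElem?_take] at h3
    rw [if_pos (by omega)] at h3
    rw [Nat.add_comm i h]
    exact h3
  · intro hp
    apply List.ext_getElem?
    intro i
    simp only [List.getElem?_drop, List.getElem?_take]
    by_cases hi : i + h < grid.length
    · rw [if_pos (by omega), Nat.add_comm h i]
      exact hp i hi
    · rw [if_neg (by omega)]
      exact List.getElem?_eq_none (by omega)

-- pointwise form of one chunk comparison grid[a:a+h] = grid[:h]
theorem pv_chunk_iff (grid : List (List Int)) (a h : ℕ) :
    ((grid.drop a).take h = grid.take h) ↔ (∀ j, j < h → grid[a + j]? = grid[j]?) := by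
  constructor
  · intro he j hj
    have h3 := congrArg (fun l => l[j]?) he
    simp only [List.getElem?_drop, List.getElem?_take] at h3
    rw [if_pos hj, if_pos hj] at h3
    exact h3
  · intro hp
    apply List.ext_getElem?
    intro j
    simp only [List.getElem?_drop, List.getElem?_take]
    by_cases hj : j < h
    · rw [if_pos hj, if_pos hj]
      exact hp j hj
    · rw [if_neg hj, if_neg hj]

theorem pv_pointwise_of_shift (grid : List (List Int)) (h : ℕ) (h1 : 1 ≤ h)
    (S : ∀ i, i + h < grid.length → grid[i + h]? = grid[i]?) :
    ∀ k j, j < h → k * h + j < grid.length → grid[k * h + j]? = grid[j]? := by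
  intro k
  induction k with
  | zero => intro j _ _; simp
  | succ k ih =>
    intro j hj hlt
    have hkh : (k + 1) * h + j = (k * h + j) + h := by ring
    have hk : k * h + j < grid.length := by omega
    rw [hkh, S _ (by omega)]
    exact ih j hj hk

theorem pv_tile_iff (grid : List (List Int)) (h : ℕ) (h1 : 1 ≤ h)
    (h2 : 2 * h ≤ grid.length) (hd : grid.length % h = 0) :
    (∀ k ∈ List.range' 1 (grid.length / h - 1),
        (grid.drop (k * h)).take h = grid.take h) ↔
      grid.drop h = grid.take (grid.length - h) := by
  have hh : h ≤ grid.length := by omega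
  have hn : grid.length = (grid.length / h) * h :=
    (Nat.div_mul_cancel (Nat.dvd_of_mod_eq_zero hd)).symm
  have hq2 : 2 ≤ grid.length / h := (Nat.le_div_iff_mul_le (by omega)).mpr (by omega)
  rw [pv_shift_iff grid h hh]
  constructor
  · -- chunks ⇒ shift
    intro hc
    have hchunk : ∀ m, 1 ≤ m → m < grid.length / h → ∀ j', j' < h →
        grid[m * h + j']? = grid[j']? := by
      intro m hm1 hm2 j' hj'
      have hmem : m ∈ List.range' 1 (grid.length / h - 1) := by
        rw [List.mem_range'_1]; omega
      exact (pv_chunk_iff grid (m * h) h).mp (hc m hmem) j' hj'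
    intro i hi
    have hdm : h * (i / h) + i % h = i := Nat.div_add_mod i h
    have hj : i % h < h := Nat.mod_lt _ (by omega)
    have hcomm : h * (i / h) = (i / h) * h := Nat.mul_comm _ _
    have hmul : (i / h + 1) * h = (i / h) * h + h := by ring
    have hkh : (i / h + 1) * h + i % h < grid.length := by omega
    have hk1 : i / h + 1 < grid.length / h := by
      by_contra hcon
      rw [Nat.not_lt] at hcon
      have := Nat.mul_le_mul_right h hcon
      omega
    have e2 : grid[(i / h + 1) * h + i % h]? = grid[i % h]? :=
      hchunk (i / h + 1) (Nat.le_add_left 1 (i / h)) hk1 _ hj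
    have e1 : grid[i]? = grid[i % h]? := by
      rcases Nat.eq_zero_or_pos (i / h) with hk0 | hkpos
      · rw [hk0] at hdm
        simp only [Nat.mul_zero, Nat.zero_add] at hdm
        rw [hdm]
      · have hie : i = (i / h) * h + i % h := by omega
        have hc1 := hchunk (i / h) hkpos (Nat.lt_of_succ_lt hk1) (i % h) hj
        rw [← hie] at hc1
        exact hc1
    have hiH : i + h = (i / h + 1) * h + i % h := by omega
    rw [hiH, e2, e1]
  · -- shift ⇒ chunks
    intro S k hkmem
    rw [List.mem_range'_1] at hkmem
    have hmul : (k + 1) * h = k * h + h := by ring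
    have h2' : (k + 1) * h ≤ (grid.length / h) * h :=
      Nat.mul_le_mul_right h (by omega)
    exact (pv_chunk_iff grid (k * h) h).mpr
      (fun j hj => pv_pointwise_of_shift grid h h1 S k j hj (by omega))

-- A's inner boolean tiling test, as a whole, is pvPer (for a divisor h with 2h ≤ rows)
theorem pv_tileb_iff (g : List (List Int)) (h : ℕ) (h1 : 1 ≤ h)
    (h2 : 2 * h ≤ g.length) (hd : g.length % h = 0) :
    (((List.range' 1 (g.length / h - 1)).all (fun k =>
        PySem.List.slice g (some ((k * h : Nat) : Int)) (some (((k + 1) * h : Nat) : Int)) ==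
          PySem.List.slice g none (some ((h : Nat) : Int)))) = true) ↔ pvPer g h := by
  simp only [PySem.List.slice_natCast, PySem.List.slice_to_natCast, Nat.add_mul, Nat.one_mul, Nat.add_sub_cancel_left,
    List.all_eq_true, beq_iff_eq]
  rw [← pv_shift_iff g h (by omega)]
  exact pv_tile_iff g h h1 h2 hd

-- difference of two periods is a period (when p + q ≤ length)
theorem pv_per_sub (g : List (List Int)) (p q : ℕ) (hpq : p ≤ q) (hs : p + q ≤ g.length)
    (hp : pvPer g p) (hq : pvPer g q) : pvPer g (q - p) := by
  intro i hi
  by_cases hc : i + q < g.length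
  · have e1 := hq i hc
    have e2 : g[(i + (q - p)) + p]? = g[i + (q - p)]? := hp _ (by omega)
    have he : i + (q - p) + p = i + q := by omega
    rw [he] at e2
    rw [← e2, e1]
  · have e1 : g[(i - p) + p]? = g[i - p]? := hp _ (by omega)
    have e2 : g[(i - p) + q]? = g[i - p]? := hq _ (by omega)
    have he1 : i - p + p = i := by omega
    have he2 : i - p + q = i + (q - p) := by omega
    rw [he1] at e1
    rw [he2] at e2
    rw [e2, ← e1]

-- Fine–Wilf (weak form): two periods p, q with p + q ≤ length give period gcd p q
theorem pv_fine_wilf (g : List (List Int)) :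
    ∀ (fuel p q : ℕ), p + q ≤ fuel → 0 < p → 0 < q → p + q ≤ g.length →
      pvPer g p → pvPer g q → pvPer g (Nat.gcd p q) := by
  intro fuel
  induction fuel with
  | zero => intro p q hf hp _ _ _ _; omega
  | succ f ih =>
    intro p q hf hp hq hlen Pp Pq
    rcases le_total p q with hle | hle
    · rcases Nat.eq_or_lt_of_le hle with rfl | hlt
      · simpa [Nat.gcd_self] using Pp
      · have hsub : pvPer g (q - p) := pv_per_sub g p q hle hlen Pp Pq
        have hrec := ih p (q - p) (by omega) hp (by omega) (by omega) Pp hsub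
        rwa [Nat.gcd_sub_self_right hle] at hrec
    · rcases Nat.eq_or_lt_of_le hle with rfl | hlt
      · simpa [Nat.gcd_self] using Pp
      · have hsub : pvPer g (p - q) := pv_per_sub g q p hle (by omega) Pq Pp
        have hrec := ih (p - q) q (by omega) (by omega) hq (by omega) hsub Pq
        rwa [Nat.gcd_sub_self_left hle] at hrec

-- the heart of the equivalence, stated over the unfolded bodies of the two ports
theorem pv_main (g : List (List Int)) (hn : 1 ≤ g.length) (cols : Int) :
    ((List.range' 1 (g.length / 2)).findSome? (fun h =>
      if g.length % h == 0 then
        let base := PySem.List.slice g none (some ((h : Nat) : Int))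
        let isVTile := (List.range' 1 (g.length / h - 1)).all (fun k =>
          PySem.List.slice g (some ((k * h : Nat) : Int)) (some (((k + 1) * h : Nat) : Int)) == base)
        if isVTile then some ((h : Int), cols) else none
      else none)) =
    (let p := ((List.range' 1 (g.length - 1)).find? (fun q =>
        (List.range' q (g.length - q)).all (fun i => g[i]? == g[i - q]?))).getD g.length
     if 2 * p ≤ g.length ∧ g.length % p = 0 then some ((p : Int), cols) else none) := by
  set n := g.length with hnn
  -- A's nested ifs as a single boolean condition
  set Ac : ℕ → Bool := fun h =>
    (n % h == 0) && ((List.range' 1 (n / h - 1)).all (fun k =>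
      PySem.List.slice g (some ((k * h : Nat) : Int)) (some (((k + 1) * h : Nat) : Int)) ==
        PySem.List.slice g none (some ((h : Nat) : Int)))) with hAc
  have hcongr : (List.range' 1 (n / 2)).findSome? (fun h =>
      if n % h == 0 then
        let base := PySem.List.slice g none (some ((h : Nat) : Int))
        let isVTile := (List.range' 1 (n / h - 1)).all (fun k =>
          PySem.List.slice g (some ((k * h : Nat) : Int)) (some (((k + 1) * h : Nat) : Int)) == base)
        if isVTile then some ((h : Int), cols) else none
      else none) =
      (List.range' 1 (n / 2)).findSome? (fun h =>
        if Ac h then some ((h : Int), cols) else none) := by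
    apply pv_findSome?_congr
    intro h _
    by_cases h0 : (n % h == 0)
    · by_cases ht : ((List.range' 1 (n / h - 1)).all (fun k =>
          PySem.List.slice g (some ((k * h : Nat) : Int)) (some (((k + 1) * h : Nat) : Int)) ==
            PySem.List.slice g none (some ((h : Nat) : Int)))) <;>
        simp [hAc, h0, ht]
    · simp [hAc, h0]
  rw [hcongr, pv_findSome?_if_eq_map]
  -- Ac h, on the candidate range, means pvPer g h together with divisibility
  have hAc_iff : ∀ h, 1 ≤ h → 2 * h ≤ n → (Ac h = true ↔ (n % h = 0 ∧ pvPer g h)) := by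
    intro h h1 h2
    rw [hAc]
    simp only [Bool.and_eq_true, beq_iff_eq]
    constructor
    · rintro ⟨hd, ht⟩
      exact ⟨hd, (pv_tileb_iff g h h1 h2 hd).mp ht⟩
    · rintro ⟨hd, hp⟩
      exact ⟨hd, (pv_tileb_iff g h h1 h2 hd).mpr hp⟩
  -- B's test is pvPer
  have hPb : ∀ q, (((List.range' q (n - q)).all (fun i => g[i]? == g[i - q]?)) = true) ↔ pvPer g q :=
    fun q => pv_allshift_iff g q
  cases hB : (List.range' 1 (n - 1)).find? (fun q =>
      (List.range' q (n - q)).all (fun i => g[i]? == g[i - q]?)) with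
  | none =>
    -- no vertical period at all below n ⇒ A finds nothing, B's p = n fails the size test
    have hnone : ∀ q, 1 ≤ q → q < n → ¬ pvPer g q := by
      intro q hq1 hq2 hper
      have := List.find?_eq_none.mp hB q (by rw [List.mem_range'_1]; omega)
      exact this ((hPb q).mpr hper)
    have hAnone : (List.range' 1 (n / 2)).find? Ac = none := by
      rw [List.find?_eq_none]
      intro h hmem hac
      rw [List.mem_range'_1] at hmem
      have h2 : 2 * h ≤ n := by
        have := (Nat.le_div_iff_mul_le (by norm_num : 0 < 2)).mp (by omega : h ≤ n / 2)
        omega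
      have := (hAc_iff h hmem.1 h2).mp hac
      exact hnone h hmem.1 (by omega) this.2
    rw [hAnone]
    simp only [Option.map_none, Option.getD_none]
    rw [if_neg (by omega)]
  | some p =>
    have hsome := pv_find?_range'_eq_some.mp hB
    obtain ⟨hp1, hp2, hpb, hmin⟩ := hsome
    have hper : pvPer g p := (hPb p).mp hpb
    have hminp : ∀ q, 1 ≤ q → q < p → ¬ pvPer g q := by
      intro q hq1 hq2 hper'
      have := hmin q hq1 hq2
      rw [Bool.eq_false_iff] at this
      exact this ((hPb q).mpr hper')
    simp only [Option.getD_some]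
    by_cases hcond : 2 * p ≤ n ∧ n % p = 0
    · -- B returns (p, cols); A's first hit is also p
      have hfind : (List.range' 1 (n / 2)).find? Ac = some p := by
        rw [pv_find?_range'_eq_some]
        refine ⟨hp1, ?_, ?_, ?_⟩
        · have : p ≤ n / 2 := (Nat.le_div_iff_mul_le (by norm_num : 0 < 2)).mpr (by omega)
          omega
        · exact (hAc_iff p hp1 hcond.1).mpr ⟨hcond.2, hper⟩
        · intro q hq1 hq2
          rw [Bool.eq_false_iff]
          intro hac
          have h2q : 2 * q ≤ n := by omega
          exact hminp q hq1 hq2 ((hAc_iff q hq1 h2q).mp hac).2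
      rw [hfind, if_pos hcond]
      rfl
    · -- B returns none; show no h on A's range can pass
      have hAnone : (List.range' 1 (n / 2)).find? Ac = none := by
        rw [List.find?_eq_none]
        intro h hmem hac
        rw [List.mem_range'_1] at hmem
        have h2 : 2 * h ≤ n := by
          have := (Nat.le_div_iff_mul_le (by norm_num : 0 < 2)).mp (by omega : h ≤ n / 2)
          omega
        obtain ⟨hd, hph⟩ := (hAc_iff h hmem.1 h2).mp hac
        -- h ≥ p by minimality of p
        have hhp : p ≤ h := by
          by_contra hcon
          exact hminp h hmem.1 (by omega) hph
        rcases Decidable.not_and_iff_or_not.mp hcond with hlt | hdvd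
        · omega
        · -- n % p ≠ 0; Fine–Wilf forces gcd p h = p, hence p ∣ h ∣ n, contradiction
          have hgcd : pvPer g (Nat.gcd p h) :=
            pv_fine_wilf g (p + h) p h (le_refl _) (by omega) (by omega) (by omega) hper hph
          have hgle : Nat.gcd p h ≤ p := Nat.le_of_dvd (by omega) (Nat.gcd_dvd_left p h)
          have hgpos : 0 < Nat.gcd p h := Nat.gcd_pos_of_pos_left h (by omega)
          have hgp : Nat.gcd p h = p := by
            by_contra hcon
            exact hminp (Nat.gcd p h) hgpos (by omega) hgcd
          have hdvd' : p ∣ n := hgp ▸ (Nat.gcd_dvd_right p h) |>.trans (Nat.dvd_of_mod_eq_zero hd)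
          exact hdvd (Nat.mod_eq_zero_of_dvd hdvd')
      rw [hAnone]
      simp only [Option.map_none]
      rw [if_neg hcond]

-- ===== VERDICT (by name: the statement is the Claim_ definition above) =====
theorem detect_periodicity_spec : Claim_equal_detect_periodicity := by
  intro grid _ hpre
  unfold Spec_detect_periodicity
  match grid, hpre with
  | r :: t, _ =>
  unfold detect_periodicity detect_periodicity_alt
  have hget : PySem.List.pyGet? (r :: t) 0 = some r := by
    simp [PySem.List.pyGet?, PySem.List.pyIdx?]
  rw [hget]
  exact pv_main (r :: t) (by simp) (r.length : Int)
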